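-- pv_equiv track=rewrite | github.com/ncux-ad/peg_solver | invariants.py | count_isolated_pegs
-- ===== SOURCE A (Python) =====
-- from typing import Dict, Tuple, FrozenSet, TYPE_CHECKING
--
-- Position = Tuple[int, int]
--
-- def count_isolated_pegs(pegs: FrozenSet[Position]) -> int:
--     """
--     Подсчёт изолированных колышков (без соседей).
--     Оптимизировано для frozenset.
--     """
--     count = 0
--     for r, c in pegs:
--         has_neighbor = any(
--             (r + dr, c + dc) in pegs
--             for dr, dc in [(-1, 0), (1, 0), (0, -1), (0, 1)]
--         )
--         if not has_neighbor:
--             count += 1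
--     return count
-- ===== SOURCE B (Python) =====
-- def count_isolated_pegs(pegs):
--     """Direction-major: build the set of non-isolated pegs via shifted-set
--     intersections, then count the pegs outside it."""
--     P = set(pegs)
--     non_isolated = set()
--     for dr, dc in ((-1, 0), (1, 0), (0, -1), (0, 1)):
--         shifted = {(r + dr, c + dc) for r, c in P}
--         non_isolated |= P & shifted
--     return sum(1 for p in pegs if p not in non_isolated)
-- ===== Notes on version B (the rewrite author's own statement) =====
-- stated objective: alternative
-- what changed: Replaces the per-peg any()-over-4-neighbors scan by a direction-major pass: for each of the 4 deltas intersect the peg set with its shifted copy, union these into a non-isolated set, and count pegs outside it.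
import Mathlib
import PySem

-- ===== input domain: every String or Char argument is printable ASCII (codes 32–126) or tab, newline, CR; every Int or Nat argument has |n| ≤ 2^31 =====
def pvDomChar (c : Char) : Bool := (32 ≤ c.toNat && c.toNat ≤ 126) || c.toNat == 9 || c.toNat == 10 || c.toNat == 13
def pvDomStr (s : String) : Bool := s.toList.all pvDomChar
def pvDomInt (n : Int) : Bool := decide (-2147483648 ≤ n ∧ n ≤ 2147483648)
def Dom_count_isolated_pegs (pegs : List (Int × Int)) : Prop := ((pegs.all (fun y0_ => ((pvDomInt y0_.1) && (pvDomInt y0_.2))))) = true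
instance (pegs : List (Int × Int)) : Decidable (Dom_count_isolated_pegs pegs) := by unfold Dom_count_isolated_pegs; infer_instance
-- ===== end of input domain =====

-- B is an alternative of the same cost: direction-major set intersections instead of a per-peg neighbor scan.

-- ===== PORT A =====
-- per-peg scan: for each peg, any() over the four orthogonal neighbors
def count_isolated_pegs (pegs : List (Int × Int)) : Int :=
  pegs.foldl
    (fun count p =>
      let has_neighbor :=
        ([((-1 : Int), (0 : Int)), (1, 0), (0, -1), (0, 1)]).any
          (fun d => pegs.contains (p.1 + d.1, p.2 + d.2))
      if !has_neighbor then count + 1 else count)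
    0

-- ===== PORT B =====
-- direction-major: union of (P ∩ shifted-P) over the four deltas, then count pegs outside it
def count_isolated_pegs_alt (pegs : List (Int × Int)) : Int :=
  let P : PySem.Set (Int × Int) := PySem.Set.ofList pegs
  let nonIso : PySem.Set (Int × Int) :=
    ([((-1 : Int), (0 : Int)), (1, 0), (0, -1), (0, 1)]).foldl
      (fun ni d =>
        let shifted : PySem.Set (Int × Int) :=
          PySem.Set.ofList (P.map (fun p => (p.1 + d.1, p.2 + d.2)))
        PySem.Set.union ni (PySem.Set.inter P shifted))
      PySem.Set.empty
  pegs.foldl (fun acc p => if PySem.Set.contains nonIso p then acc else acc + 1) 0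

-- ===== PRECONDITION & SPEC =====
def Spec_count_isolated_pegs (pegs : List (Int × Int)) (out : Int) : Prop := out = count_isolated_pegs_alt pegs
instance (pegs : List (Int × Int)) (out : Int) : Decidable (Spec_count_isolated_pegs pegs out) := by unfold Spec_count_isolated_pegs; infer_instance

-- ===== CLAIM (what is proved, stated in full; the proofs are below) =====
def Claim_equal_count_isolated_pegs : Prop := ∀ (pegs : List (Int × Int)), Dom_count_isolated_pegs pegs → Spec_count_isolated_pegs pegs (count_isolated_pegs pegs)

-- ===== LEMMAS AND PROOFS =====


lemma mem_nonIso (pegs : List (Int × Int)) (p : Int × Int) :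
    (p ∈ ([((-1 : Int), (0 : Int)), (1, 0), (0, -1), (0, 1)]).foldl
      (fun ni d =>
        PySem.Set.union ni
          (PySem.Set.inter (PySem.Set.ofList pegs)
            (PySem.Set.ofList ((PySem.Set.ofList pegs).map (fun q => (q.1 + d.1, q.2 + d.2))))))
      PySem.Set.empty)
    ↔ p ∈ pegs ∧
      ((p.1 + 1, p.2) ∈ pegs ∨ (p.1 - 1, p.2) ∈ pegs ∨ (p.1, p.2 + 1) ∈ pegs ∨ (p.1, p.2 - 1) ∈ pegs) := by
  obtain ⟨p1, p2⟩ := p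
  simp only [List.foldl, PySem.Set.mem_union, PySem.Set.mem_inter, PySem.Set.mem_ofList,
    PySem.Set.empty, List.not_mem_nil, false_or, List.mem_map, Prod.mk.injEq, Prod.exists]
  constructor
  · rintro (((⟨hp, x, y, hq, h1, h2⟩ | ⟨hp, x, y, hq, h1, h2⟩) | ⟨hp, x, y, hq, h1, h2⟩) |
      ⟨hp, x, y, hq, h1, h2⟩) <;> refine ⟨hp, ?_⟩ <;>
      [exact Or.inl (by have hx : x = p1 + 1 := by omega
                        have hy : y = p2 := by omega
                        rw [hx, hy] at hq; exact hq);
       exact Or.inr (Or.inl (by have hx : x = p1 - 1 := by omega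
                                have hy : y = p2 := by omega
                                rw [hx, hy] at hq; exact hq));
       exact Or.inr (Or.inr (Or.inl (by have hx : x = p1 := by omega
                                        have hy : y = p2 + 1 := by omega
                                        rw [hx, hy] at hq; exact hq)));
       exact Or.inr (Or.inr (Or.inr (by have hx : x = p1 := by omega
                                        have hy : y = p2 - 1 := by omega
                                        rw [hx, hy] at hq; exact hq)))]
  · rintro ⟨hp, (h | h | h | h)⟩
    · exact Or.inl (Or.inl (Or.inl ⟨hp, p1 + 1, p2, h, by omega, by omega⟩))
    · exact Or.inl (Or.inl (Or.inr ⟨hp, p1 - 1, p2, h, by omega, by omega⟩))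
    · exact Or.inl (Or.inr ⟨hp, p1, p2 + 1, h, by omega, by omega⟩)
    · exact Or.inr ⟨hp, p1, p2 - 1, h, by omega, by omega⟩

-- A's per-peg any() condition, as the same four-neighbor disjunction
lemma hasNeighbor_eq (pegs : List (Int × Int)) (p : Int × Int) :
    (([((-1 : Int), (0 : Int)), (1, 0), (0, -1), (0, 1)]).any
        (fun d => pegs.contains (p.1 + d.1, p.2 + d.2)) = true)
    ↔ ((p.1 + 1, p.2) ∈ pegs ∨ (p.1 - 1, p.2) ∈ pegs ∨ (p.1, p.2 + 1) ∈ pegs ∨ (p.1, p.2 - 1) ∈ pegs) := by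
  obtain ⟨p1, p2⟩ := p
  simp only [List.any_cons, List.any_nil, Bool.or_eq_true, Bool.false_eq_true, or_false,
    List.contains_iff_mem]
  constructor
  · rintro (h | h | h | h) <;> simp at h
    · exact Or.inr (Or.inl (by simpa [sub_eq_add_neg] using h))
    · exact Or.inl h
    · exact Or.inr (Or.inr (Or.inr (by simpa [sub_eq_add_neg] using h)))
    · exact Or.inr (Or.inr (Or.inl h))
  · rintro (h | h | h | h)
    · exact Or.inr (Or.inl (by simpa using h))
    · exact Or.inl (by simpa [sub_eq_add_neg] using h)
    · exact Or.inr (Or.inr (Or.inr (by simpa using h)))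
    · exact Or.inr (Or.inr (Or.inl (by simpa [sub_eq_add_neg] using h)))

theorem count_isolated_pegs_key (pegs : List (Int × Int)) :
    count_isolated_pegs pegs = count_isolated_pegs_alt pegs := by
  unfold count_isolated_pegs count_isolated_pegs_alt
  simp only []
  apply PySem.List.foldl_congr_mem'
  intro p hp acc
  by_cases h : (p.1 + 1, p.2) ∈ pegs ∨ (p.1 - 1, p.2) ∈ pegs ∨ (p.1, p.2 + 1) ∈ pegs ∨ (p.1, p.2 - 1) ∈ pegs
  · have hA : (([((-1 : Int), (0 : Int)), (1, 0), (0, -1), (0, 1)]).any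
        (fun d => pegs.contains (p.1 + d.1, p.2 + d.2))) = true := (hasNeighbor_eq pegs p).mpr h
    have hB : PySem.Set.contains
        (([((-1 : Int), (0 : Int)), (1, 0), (0, -1), (0, 1)]).foldl
          (fun ni d =>
            PySem.Set.union ni
              (PySem.Set.inter (PySem.Set.ofList pegs)
                (PySem.Set.ofList ((PySem.Set.ofList pegs).map (fun q => (q.1 + d.1, q.2 + d.2))))))
          PySem.Set.empty) p = true := by
      simp only [PySem.Set.contains, List.contains_iff_mem]
      exact (mem_nonIso pegs p).mpr ⟨hp, h⟩
    simp only [hA, hB]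
    simp
  · have hA : (([((-1 : Int), (0 : Int)), (1, 0), (0, -1), (0, 1)]).any
        (fun d => pegs.contains (p.1 + d.1, p.2 + d.2))) = false := by
      rw [← Bool.not_eq_true]; intro hc; exact h ((hasNeighbor_eq pegs p).mp hc)
    have hB : PySem.Set.contains
        (([((-1 : Int), (0 : Int)), (1, 0), (0, -1), (0, 1)]).foldl
          (fun ni d =>
            PySem.Set.union ni
              (PySem.Set.inter (PySem.Set.ofList pegs)
                (PySem.Set.ofList ((PySem.Set.ofList pegs).map (fun q => (q.1 + d.1, q.2 + d.2))))))
          PySem.Set.empty) p = false := by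
      rw [← Bool.not_eq_true]
      simp only [PySem.Set.contains, List.contains_iff_mem]
      intro hc; exact h ((mem_nonIso pegs p).mp hc).2
    simp only [hA, hB]
    simp

-- ===== VERDICT (by name: the statement is the Claim_ definition above) =====
theorem count_isolated_pegs_spec : Claim_equal_count_isolated_pegs := by
  intro pegs _
  exact count_isolated_pegs_key pegs
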